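-- pv_equiv track=rewrite | github.com/CMU-SAFARI/sasiml | compiler/modules/gflow_igrad.py | __res_pos
-- ===== SOURCE A (Python) =====
-- def __res_pos(res):
--     '''
--     Calculate positions in memory
--     '''
--     result = [[0 for w in range(len(res[0]))] for h in range(len(res))]
--     for w in range(len(res[0])):
--         for h in range(len(res)):
--             ss = sorted(list(set([res[y][w] for y in range(len(res))])))
--             for i in range(len(ss)):
--                 if res[h][w] == ss[i]:
--                     result[h][w] = i
--                     break
--     return result
-- ===== SOURCE B (Python) =====
-- def __res_pos(res):
--     '''
--     Calculate positions in memory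
--     '''
--     cols = len(res[0])
--     distinct = [{row[w] for row in res} for w in range(cols)]
--     return [[sum(1 for v in distinct[w] if v < row[w]) for w in range(cols)]
--             for row in res]
-- ===== Notes on version B (the rewrite author's own statement) =====
-- stated objective: faster
-- what changed: Instead of sorting each column's distinct values for every cell and linearly scanning that sorted list for a matching index, B builds each column's distinct-value set once and derives each rank by counting distinct values strictly smaller than the cell.
import Mathlib
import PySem

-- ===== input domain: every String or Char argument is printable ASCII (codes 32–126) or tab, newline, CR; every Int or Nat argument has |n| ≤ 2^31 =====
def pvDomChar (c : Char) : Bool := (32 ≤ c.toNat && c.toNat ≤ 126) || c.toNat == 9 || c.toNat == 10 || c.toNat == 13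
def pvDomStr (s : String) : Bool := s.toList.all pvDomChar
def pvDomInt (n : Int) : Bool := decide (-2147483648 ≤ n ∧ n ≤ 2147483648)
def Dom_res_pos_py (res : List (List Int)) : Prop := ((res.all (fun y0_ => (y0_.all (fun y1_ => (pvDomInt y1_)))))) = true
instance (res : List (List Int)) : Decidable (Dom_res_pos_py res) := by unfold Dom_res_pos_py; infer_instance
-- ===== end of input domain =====

-- B replaces A's per-cell sort-then-scan by counting, per cell, the column's distinct values
-- strictly below the cell's value (the distinct set is built once per column); objective: faster.

-- ===== PORT A =====
-- inner 'for i in range(len(ss)): if res[h][w] == ss[i]: result[h][w] = i; break'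
def findPos : List Int → Int → Int → Option Int
  | [], _, _ => none
  | s :: rest, v, i => if v = s then some i else findPos rest v (i + 1)

-- result[h][w] = v  (out-of-range set is a no-op, as in Python it cannot happen under Pre_)
def setCell (m : List (List Int)) (h w : Nat) (v : Int) : List (List Int) :=
  m.set h ((m.getD h []).set w v)

def res_pos_py (res : List (List Int)) : List (List Int) :=
  (List.range (res.headD []).length).foldl (fun result w =>
    (List.range res.length).foldl (fun result h =>
      match findPos (PySem.List.sorted
          (PySem.Set.ofList ((List.range res.length).map (fun y => (res.getD y []).getD w 0)))
          (fun x => x) false) ((res.getD h []).getD w 0) 0 with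
      | some i => setCell result h w i
      | none => result) result)
    ((List.range res.length).map
      (fun _ => (List.range (res.headD []).length).map (fun _ => (0 : Int))))

-- ===== PORT B =====
def res_pos_py_alt (res : List (List Int)) : List (List Int) :=
  res.map (fun row => (List.range (res.headD []).length).map
    (fun w => (((((List.range (res.headD []).length).map
        (fun w => PySem.Set.ofList (res.map (fun row => row.getD w 0)))).getD w
          []).countP (fun v => v < row.getD w 0) : Nat) : Int)))

-- ===== PRECONDITION & SPEC =====
-- Pre_ excludes exactly the inputs where Python A raises an IndexError: the empty list
-- (res[0]) and ragged inputs where some row is shorter than row 0 (res[y][w]).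
def Pre_res_pos_py (res : List (List Int)) : Prop :=
  res ≠ [] ∧ ∀ row ∈ res, (res.headD []).length ≤ row.length
instance (res : List (List Int)) : Decidable (Pre_res_pos_py res) := by
  unfold Pre_res_pos_py; infer_instance

def pvWitness_res_pos_py : List (List Int) := [[3, 1], [1, 2]]

def Spec_res_pos_py (res : List (List Int)) (out : List (List Int)) : Prop := out = res_pos_py_alt res
instance (res : List (List Int)) (out : List (List Int)) : Decidable (Spec_res_pos_py res out) := by unfold Spec_res_pos_py; infer_instance

-- ===== CLAIM (what is proved, stated in full; the proofs are below) =====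
def Claim_equal_res_pos_py : Prop := ∀ (res : List (List Int)), Dom_res_pos_py res → Pre_res_pos_py res → Spec_res_pos_py res (res_pos_py res)

-- ===== LEMMAS AND PROOFS =====

-- the column of values res[·][w], as port A enumerates it
def colVals (res : List (List Int)) (w : Nat) : List Int :=
  (List.range res.length).map (fun y => (res.getD y []).getD w 0)

-- the per-cell value both programs produce
def cellG (res : List (List Int)) (h w : Nat) : Int :=
  ((PySem.Set.ofList (colVals res w)).countP (fun v => v < (res.getD h []).getD w 0) : Int)

def Shape (n m : Nat) (M : List (List Int)) : Prop :=
  M.length = n ∧ ∀ row ∈ M, row.length = m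

def get2 (M : List (List Int)) (h w : Nat) : Int := (M.getD h []).getD w 0

lemma colVals_eq_map (res : List (List Int)) (w : Nat) :
    colVals res w = res.map (fun row => row.getD w 0) := by
  apply List.ext_getElem
  · simp [colVals]
  · intro i h1 h2
    have hi : i < res.length := by simpa [colVals] using h1
    simp [colVals, List.getD, List.getElem?_eq_getElem hi]

lemma findPos_strict (ss : List Int) (v : Int) (hs : ss.Pairwise (· < ·)) (hv : v ∈ ss) :
    ∀ i : Int, findPos ss v i = some (i + (ss.countP (fun x => x < v) : Int)) := by
  induction ss with
  | nil => cases hv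
  | cons s rest ih =>
    intro i
    rcases List.pairwise_cons.mp hs with ⟨hlt, hrest⟩
    by_cases hvs : v = s
    · have hz : (s :: rest).countP (fun x => decide (x < v)) = 0 := by
        apply List.countP_eq_zero.mpr
        intro x hx
        simp only [decide_eq_true_eq, not_lt]
        rcases List.mem_cons.mp hx with rfl | hx
        · exact le_of_eq hvs
        · rw [hvs]; exact le_of_lt (hlt x hx)
      rw [show findPos (s :: rest) v i = some i by simp [findPos, hvs], hz]
      simp
    · have hvr : v ∈ rest := by cases hv with
        | head => exact absurd rfl hvs
        | tail _ h => exact h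
      have hsv : s < v := hlt v hvr
      have hcnt : (s :: rest).countP (fun x => decide (x < v))
          = rest.countP (fun x => decide (x < v)) + 1 := by
        simp [hsv]
      rw [show findPos (s :: rest) v i = findPos rest v (i + 1) by simp [findPos, hvs]]
      rw [ih hrest hvr (i + 1), hcnt]
      congr 1
      push_cast
      ring

lemma setCell_shape {n m : Nat} {M : List (List Int)} (hS : Shape n m M)
    {h : Nat} (hh : h < n) (w : Nat) (v : Int) : Shape n m (setCell M h w v) := by
  obtain ⟨hlen, hrow⟩ := hS
  have hhM : h < M.length := hlen ▸ hh
  constructor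
  · simp [setCell, hlen]
  · intro row hmem
    rcases List.mem_or_eq_of_mem_set hmem with h1 | h1
    · exact hrow row h1
    · subst h1
      rw [List.length_set]
      exact hrow _ (by rw [List.getD_eq_getElem _ _ hhM]; exact List.getElem_mem hhM)

lemma getD_set_self (M : List (List Int)) (h : Nat) (r : List Int) (hh : h < M.length) :
    (M.set h r).getD h [] = r := by
  rw [List.getD_eq_getElem _ _ (by simpa using hh)]
  simp

lemma getD_set_ne (M : List (List Int)) (h h' : Nat) (r : List Int) (hne : h' ≠ h) :
    (M.set h r).getD h' [] = M.getD h' [] := by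
  by_cases hh : h' < M.length
  · rw [List.getD_eq_getElem _ _ (by simpa using hh), List.getD_eq_getElem _ _ hh]
    simp [hne.symm]
  · rw [List.getD_eq_default _ _ (by simpa using le_of_not_gt hh),
        List.getD_eq_default _ _ (le_of_not_gt hh)]

lemma getD_set_self_elt (r : List Int) (w : Nat) (v : Int) (hw : w < r.length) :
    (r.set w v).getD w 0 = v := by
  rw [List.getD_eq_getElem _ _ (by simpa using hw)]
  simp

lemma getD_set_ne_elt (r : List Int) (w w' : Nat) (v : Int) (hne : w' ≠ w) :
    (r.set w v).getD w' 0 = r.getD w' 0 := by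
  by_cases hw : w' < r.length
  · rw [List.getD_eq_getElem _ _ (by simpa using hw), List.getD_eq_getElem _ _ hw]
    simp [hne.symm]
  · rw [List.getD_eq_default _ _ (by simpa using le_of_not_gt hw),
        List.getD_eq_default _ _ (le_of_not_gt hw)]

lemma setCell_get2 {n m : Nat} {M : List (List Int)} (hS : Shape n m M)
    (h w : Nat) (v : Int) (hh : h < n) (hw : w < m) (h' w' : Nat) :
    get2 (setCell M h w v) h' w' = if h' = h ∧ w' = w then v else get2 M h' w' := by
  obtain ⟨hlen, hrow⟩ := hS
  have hhM : h < M.length := hlen ▸ hh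
  have hrlen : (M.getD h []).length = m := by
    rw [List.getD_eq_getElem _ _ hhM]
    exact hrow _ (List.getElem_mem hhM)
  unfold get2 setCell
  by_cases hhe : h' = h
  · subst hhe
    rw [getD_set_self M h' _ hhM]
    by_cases hwe : w' = w
    · subst hwe
      rw [if_pos ⟨rfl, rfl⟩, getD_set_self_elt _ _ _ (hrlen ▸ hw)]
    · rw [if_neg (by tauto), getD_set_ne_elt _ _ _ _ hwe]
  · rw [getD_set_ne M h h' _ hhe, if_neg (by tauto)]

lemma inner_fill {n m : Nat} (w : Nat) (G : Nat → Int) (hw : w < m) :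
    ∀ (hs : List Nat) (M : List (List Int)), Shape n m M → (∀ h ∈ hs, h < n) →
    Shape n m (hs.foldl (fun M h => setCell M h w (G h)) M) ∧
    ∀ h' w', get2 (hs.foldl (fun M h => setCell M h w (G h)) M) h' w'
      = if h' ∈ hs ∧ w' = w then G h' else get2 M h' w' := by
  intro hs
  induction hs with
  | nil => intro M hS _; exact ⟨hS, by simp⟩
  | cons h t ih =>
    intro M hS hmem
    have hhn : h < n := hmem h (List.mem_cons_self)
    have hS' := setCell_shape hS hhn w (G h)
    obtain ⟨ihS, ihG⟩ := ih (setCell M h w (G h)) hS' (fun x hx => hmem x (List.mem_cons_of_mem _ hx))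
    refine ⟨ihS, ?_⟩
    intro h' w'
    rw [List.foldl_cons, ihG h' w', setCell_get2 hS h w (G h) hhn hw h' w']
    by_cases h1 : h' ∈ t ∧ w' = w
    · rw [if_pos h1, if_pos ⟨List.mem_cons_of_mem _ h1.1, h1.2⟩]
    · by_cases h2 : h' = h ∧ w' = w
      · rw [if_neg h1, if_pos h2, if_pos ⟨by simp [h2.1], h2.2⟩, h2.1]
      · have hni : ¬(h' ∈ h :: t ∧ w' = w) := by
          rintro ⟨hm, rfl⟩
          rcases List.mem_cons.mp hm with rfl | hm
          · exact h2 ⟨rfl, rfl⟩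
          · exact h1 ⟨hm, rfl⟩
        rw [if_neg h1, if_neg h2, if_neg hni]

lemma outer_fill {n m : Nat} (G2 : Nat → Nat → Int) :
    ∀ (ws : List Nat) (M : List (List Int)), Shape n m M → (∀ w ∈ ws, w < m) →
    Shape n m (ws.foldl (fun M w => (List.range n).foldl (fun M h => setCell M h w (G2 h w)) M) M) ∧
    ∀ h' w', get2 (ws.foldl (fun M w => (List.range n).foldl (fun M h => setCell M h w (G2 h w)) M) M) h' w'
      = if w' ∈ ws ∧ h' < n then G2 h' w' else get2 M h' w' := by
  intro ws
  induction ws with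
  | nil => intro M hS _; exact ⟨hS, by simp⟩
  | cons w t ih =>
    intro M hS hmem
    have hwm : w < m := hmem w (List.mem_cons_self)
    obtain ⟨iS, iG⟩ := inner_fill (n := n) (m := m) w (fun h => G2 h w) hwm
      (List.range n) M hS (fun h hh => List.mem_range.mp hh)
    obtain ⟨ihS, ihG⟩ := ih _ iS (fun x hx => hmem x (List.mem_cons_of_mem _ hx))
    refine ⟨ihS, ?_⟩
    intro h' w'
    rw [List.foldl_cons, ihG h' w', iG h' w']
    by_cases h1 : w' ∈ t ∧ h' < n
    · rw [if_pos h1, if_pos ⟨List.mem_cons_of_mem _ h1.1, h1.2⟩]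
    · by_cases h2 : h' ∈ List.range n ∧ w' = w
      · have hn : h' < n := List.mem_range.mp h2.1
        rw [if_neg h1, if_pos h2, if_pos ⟨by simp [h2.2], hn⟩, h2.2]
      · have hni : ¬(w' ∈ w :: t ∧ h' < n) := by
          rintro ⟨hm, hn⟩
          rcases List.mem_cons.mp hm with rfl | hm
          · exact h2 ⟨List.mem_range.mpr hn, rfl⟩
          · exact h1 ⟨hm, hn⟩
        rw [if_neg h1, if_neg h2, if_neg hni]

-- A's per-cell search over the sorted distinct column returns exactly B's count
lemma findPos_eq_cellG (res : List (List Int))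
    (h w : Nat) (hh : h < res.length) :
    findPos (PySem.List.sorted (PySem.Set.ofList (colVals res w)) (fun x => x) false)
      ((res.getD h []).getD w 0) 0 = some (cellG res h w) := by
  set ss := PySem.List.sorted (PySem.Set.ofList (colVals res w)) (fun x => x) false with hss
  have hpw : ss.Pairwise (· < ·) := PySem.List.sorted_ofList_pairwise_lt _
  have hperm : ss.Perm (PySem.Set.ofList (colVals res w)) := PySem.List.sorted_perm _ _ _
  have hv : (res.getD h []).getD w 0 ∈ ss := by
    rw [hperm.mem_iff, PySem.Set.mem_ofList]
    unfold colVals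
    exact List.mem_map.mpr ⟨h, List.mem_range.mpr hh, rfl⟩
  rw [findPos_strict ss _ hpw hv 0]
  unfold cellG
  rw [hperm.countP_eq]
  simp

-- ===== VERDICT (by name: the statement is the Claim_ definition above) =====
theorem res_pos_py_spec : Claim_equal_res_pos_py := by
  intro res _ hpre
  unfold Spec_res_pos_py
  have hS0 : Shape res.length (res.headD []).length
      ((List.range res.length).map
        (fun _ => (List.range (res.headD []).length).map (fun _ => (0 : Int)))) := by
    constructor
    · simp
    · intro row hrow
      rcases List.mem_map.mp hrow with ⟨_, _, rfl⟩
      simp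
  have hstep : ∀ (M : List (List Int)), ∀ w ∈ List.range (res.headD []).length,
      (List.range res.length).foldl (fun result h =>
        match findPos (PySem.List.sorted
            (PySem.Set.ofList ((List.range res.length).map (fun y => (res.getD y []).getD w 0)))
            (fun x => x) false) ((res.getD h []).getD w 0) 0 with
        | some i => setCell result h w i
        | none => result) M
      = (List.range res.length).foldl (fun M h => setCell M h w (cellG res h w)) M := by
    intro M w _
    apply PySem.List.foldl_congr_mem
    intro acc h hhmem
    rw [show ((List.range res.length).map (fun y => (res.getD y []).getD w 0)) = colVals res w
          from rfl,
        findPos_eq_cellG res h w (List.mem_range.mp hhmem)]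
  have hA : res_pos_py res
      = (List.range (res.headD []).length).foldl (fun M w =>
          (List.range res.length).foldl (fun M h => setCell M h w (cellG res h w)) M)
          ((List.range res.length).map
            (fun _ => (List.range (res.headD []).length).map (fun _ => (0 : Int)))) := by
    unfold res_pos_py
    apply PySem.List.foldl_congr_mem
    intro acc w hw
    exact hstep acc w hw
  obtain ⟨hAS, hAG⟩ := outer_fill (n := res.length) (m := (res.headD []).length)
    (cellG res) (List.range (res.headD []).length) _ hS0 (fun w hw => List.mem_range.mp hw)
  rw [hA]
  set A := (List.range (res.headD []).length).foldl (fun M w =>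
      (List.range res.length).foldl (fun M h => setCell M h w (cellG res h w)) M)
      ((List.range res.length).map
        (fun _ => (List.range (res.headD []).length).map (fun _ => (0 : Int)))) with hAdef
  have hBlen : (res_pos_py_alt res).length = res.length := by
    unfold res_pos_py_alt
    rw [List.length_map]
  have hBrow : ∀ h : Nat, h < res.length →
      (res_pos_py_alt res).getD h []
        = (List.range (res.headD []).length).map (fun w => cellG res h w) := by
    intro h hh
    unfold res_pos_py_alt
    rw [List.getD_eq_getElem _ _ (by rw [List.length_map]; exact hh), List.getElem_map]
    apply List.map_congr_left
    intro w hwmem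
    have hw : w < (res.headD []).length := List.mem_range.mp hwmem
    rw [show ((List.range (res.headD []).length).map
          (fun w => PySem.Set.ofList (res.map (fun row => row.getD w 0)))).getD w []
        = PySem.Set.ofList (res.map (fun row => row.getD w 0)) from by
      rw [List.getD_eq_getElem _ _ (by simpa using hw), List.getElem_map, List.getElem_range]]
    unfold cellG
    rw [colVals_eq_map, List.getD_eq_getElem _ _ hh]
  apply List.ext_getElem
  · rw [hAS.1, hBlen]
  · intro i h1 h2
    have hin : i < res.length := by rw [hAS.1] at h1; exact h1
    rw [show A[i] = A.getD i [] from (List.getD_eq_getElem _ _ h1).symm,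
        show (res_pos_py_alt res)[i] = (res_pos_py_alt res).getD i []
          from (List.getD_eq_getElem _ _ h2).symm,
        hBrow i hin]
    have hAlen : (A.getD i []).length = (res.headD []).length := by
      rw [List.getD_eq_getElem _ _ h1]
      exact hAS.2 _ (List.getElem_mem h1)
    apply List.ext_getElem
    · rw [List.length_map, List.length_range]; exact hAlen
    · intro j hj1 hj2
      have hjm : j < (res.headD []).length := by rw [hAlen] at hj1; exact hj1
      rw [show (A.getD i [])[j] = (A.getD i []).getD j 0
            from (List.getD_eq_getElem _ _ hj1).symm]
      have hg := hAG i j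
      unfold get2 at hg
      rw [hg, if_pos ⟨List.mem_range.mpr hjm, hin⟩, List.getElem_map, List.getElem_range]
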